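-- pv_equiv track=rewrite | github.com/aarhusstadsarkiv/filter_csv_generic | filter_csv_generic/id_field_list_ops.py | less_than
-- ===== SOURCE A (Python) =====
-- def less_than(fieldvalues: list, content: str) -> bool:
--
--     if fieldvalues == []:
--         return False
--     else:
--         for x in range(0, len(fieldvalues), 1):
--             entry_content_int = fieldvalues[x].split(";")[0]
--             if content > entry_content_int:
--                 return True
--
--         return False
-- ===== SOURCE B (Python) =====
-- def less_than(fieldvalues: list, content: str) -> bool:
--     if not fieldvalues:
--         return False
--     return content > min(f.split(";")[0] for f in fieldvalues)
-- ===== Notes on version B (the rewrite author's own statement) =====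
-- stated objective: simpler
-- what changed: Replaces the short-circuiting index loop ('does any entry's prefix compare below content?') with a reduce-then-compare decomposition: take the minimum of all ';'-prefixes and perform one comparison against it.
import Mathlib
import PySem

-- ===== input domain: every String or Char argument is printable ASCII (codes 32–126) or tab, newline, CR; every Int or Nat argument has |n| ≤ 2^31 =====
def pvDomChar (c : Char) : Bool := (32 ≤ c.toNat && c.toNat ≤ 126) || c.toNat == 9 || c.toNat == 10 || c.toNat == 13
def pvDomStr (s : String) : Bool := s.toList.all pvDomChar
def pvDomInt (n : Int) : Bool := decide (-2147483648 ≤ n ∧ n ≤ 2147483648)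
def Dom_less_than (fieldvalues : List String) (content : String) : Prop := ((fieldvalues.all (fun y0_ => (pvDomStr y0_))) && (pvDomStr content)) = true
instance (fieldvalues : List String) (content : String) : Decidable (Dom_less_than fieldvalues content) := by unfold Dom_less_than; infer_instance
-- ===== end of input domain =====

-- B replaces A's short-circuiting any-scan with "minimum prefix, then one comparison" (objective: simpler).
-- ===== PORT A =====
-- f.split(";")[0]: the split result is always nonempty, so index 0 never raises; headD "" is exact.
def pyPrefix (f : String) : String := ((PySem.Str.split? f ";").getD []).headD ""

-- the for-loop with early return, as structural recursion over the remaining entries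
def lessThanGo (content : String) : List String → Bool
  | [] => false
  | f :: t => if content > pyPrefix f then true else lessThanGo content t

def less_than (fieldvalues : List String) (content : String) : Bool :=
  if fieldvalues = [] then false else lessThanGo content fieldvalues

-- ===== PORT B =====
-- min(...) on a nonempty list is min? = some m; the [] guard corresponds to min? = none
def less_than_alt (fieldvalues : List String) (content : String) : Bool :=
  match PySem.List.min? (fieldvalues.map pyPrefix) (fun x => x) with
  | none => false
  | some m => decide (m < content)

-- ===== PRECONDITION & SPEC =====
def Spec_less_than (fieldvalues : List String) (content : String) (out : Bool) : Prop := out = less_than_alt fieldvalues content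
instance (fieldvalues : List String) (content : String) (out : Bool) : Decidable (Spec_less_than fieldvalues content out) := by unfold Spec_less_than; infer_instance

-- ===== CLAIM (what is proved, stated in full; the proofs are below) =====
def Claim_equal_less_than : Prop := ∀ (fieldvalues : List String) (content : String), Dom_less_than fieldvalues content → Spec_less_than fieldvalues content (less_than fieldvalues content)

-- ===== LEMMAS AND PROOFS ===== (by name: the statement is the Claim_ definition above) =====
theorem go_iff (content : String) (l : List String) :
    lessThanGo content l = true ↔ ∃ f ∈ l, pyPrefix f < content := by
  induction l with
  | nil => simp [lessThanGo]
  | cons f t ih =>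
    constructor
    · intro hc
      by_cases h : pyPrefix f < content
      · exact ⟨f, List.mem_cons_self, h⟩
      · rw [lessThanGo, if_neg h] at hc
        obtain ⟨g, hg, hlt⟩ := ih.mp hc
        exact ⟨g, List.mem_cons_of_mem _ hg, hlt⟩
    · rintro ⟨g, hg, hlt⟩
      rcases List.mem_cons.mp hg with rfl | hg'
      · rw [lessThanGo, if_pos hlt]
      · by_cases h : pyPrefix f < content
        · rw [lessThanGo, if_pos h]
        · rw [lessThanGo, if_neg h]; exact ih.mpr ⟨g, hg', hlt⟩

-- ===== VERDICT (by name: the statement is the Claim_ definition above) =====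
theorem less_than_spec : Claim_equal_less_than := by
  intro fieldvalues content _
  unfold Spec_less_than less_than less_than_alt
  rcases hm : PySem.List.min? (fieldvalues.map pyPrefix) (fun x => x) with _ | m
  · have : fieldvalues.map pyPrefix = [] := (PySem.List.min?_eq_none_iff _ _).mp hm
    have hfv : fieldvalues = [] := by simpa using this
    simp [hfv]
  · have hmem : m ∈ fieldvalues.map pyPrefix := PySem.List.min?_mem hm
    have hmin : ∀ y ∈ fieldvalues.map pyPrefix, m ≤ y := by
      intro y hy; exact PySem.List.min?_isMin hm y hy
    have hne : fieldvalues ≠ [] := by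
      rintro rfl; simp at hmem
    simp only [if_neg hne]
    by_cases h : m < content
    · obtain ⟨f, hf, hpf⟩ := List.mem_map.mp hmem
      have : lessThanGo content fieldvalues = true :=
        (go_iff content fieldvalues).mpr ⟨f, hf, by rw [hpf]; exact h⟩
      simp [this, h]
    · have : lessThanGo content fieldvalues = false := by
        rw [Bool.eq_false_iff]
        intro hc
        obtain ⟨f, hf, hpf⟩ := (go_iff content fieldvalues).mp hc
        exact h (lt_of_le_of_lt (hmin _ (List.mem_map.mpr ⟨f, hf, rfl⟩)) hpf)
      simp [this, h]
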